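-- pv_equiv track=rewrite | github.com/rsdn/nemerle | misc/svn2log.py | wrap_text_line
-- ===== SOURCE A (Python) =====
-- def wrap_text_line(str, pref, width):
--   ret = u""
--   line = u""
--   first_line = True
--   for word in str.split():
--     if line == u"":
--       line = word
--     else:
--       if len(line + u" " + word) > width:
--         if first_line:
--           ret += line + u"\n"
--           first_line = False
--           line = word
--         else:
--           ret += pref + line + u"\n"
--           line = word
--       else:
--         line += u" " + word
--   if first_line:
--     ret += line + u"\n"
--   else:
--     ret += pref + line + u"\n"
--   return ret
-- ===== SOURCE B (Python) =====
-- def wrap_text_line(str, pref, width):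
--     words = str.split()
--     if not words:
--         return "\n"
--     # prefix sums: pre[k] = sum of len(w)+1 over the first k words
--     pre = [0]
--     for w in words:
--         pre.append(pre[-1] + len(w) + 1)
--     n = len(words)
--     # compute break indices by index arithmetic: the line starting at word i
--     # extends to the largest j with pre[j] - pre[i] - 1 <= width (j > i)
--     pieces = []
--     i = 0
--     while i < n:
--         j = i + 1
--         while j < n and pre[j + 1] - pre[i] - 1 <= width:
--             j += 1
--         pieces.append(" ".join(words[i:j]))
--         i = j
--     return pieces[0] + "\n" + "".join(pref + p + "\n" for p in pieces[1:])
-- ===== Notes on version B (the rewrite author's own statement) =====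
-- stated objective: alternative
-- what changed: Replaces A's single word-by-word greedy loop that grows a current-line string with a first_line flag by index arithmetic: build a prefix-sum array of word lengths, compute each line's break index j directly from pre[j]-pre[i]-1 <= width, emit each line as ' '.join(words[i:j]), then format (first line bare, rest prefixed).
import Mathlib
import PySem

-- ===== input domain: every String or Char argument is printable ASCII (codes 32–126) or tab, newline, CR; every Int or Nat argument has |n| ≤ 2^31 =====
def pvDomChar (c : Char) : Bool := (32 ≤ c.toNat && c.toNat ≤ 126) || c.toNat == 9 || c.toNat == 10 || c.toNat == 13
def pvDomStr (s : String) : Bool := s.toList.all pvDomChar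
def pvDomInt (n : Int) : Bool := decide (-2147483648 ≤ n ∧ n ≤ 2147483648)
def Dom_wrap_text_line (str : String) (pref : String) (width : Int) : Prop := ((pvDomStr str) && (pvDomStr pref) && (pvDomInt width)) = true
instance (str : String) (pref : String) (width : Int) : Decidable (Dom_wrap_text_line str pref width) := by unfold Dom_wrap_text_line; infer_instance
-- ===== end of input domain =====

-- B replaces A's single greedy loop (current-line string + first_line flag) by index
-- arithmetic: a prefix-sum array of word lengths, break indices computed from it,
-- lines emitted as joins of word slices, then a separate formatting pass; objective:
-- alternative algorithm of the same cost.


-- ===== PORT A =====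
-- A's loop state (ret, line, first_line), folded over str.split()
def wrapA_step (pref : String) (width : Int) (st : String × String × Bool) (word : String) : String × String × Bool :=
  match st with
  | (ret, line, first_line) =>
    if line = "" then (ret, word, first_line)
    else if PySem.Str.len ((line ++ " ") ++ word) > width then
      if first_line then ((ret ++ line) ++ "\n", word, false)
      else (((ret ++ pref) ++ line) ++ "\n", word, first_line)
    else (ret, (line ++ " ") ++ word, first_line)

def wrap_text_line (str : String) (pref : String) (width : Int) : String :=
  match (PySem.Str.split₀ str).foldl (wrapA_step pref width) ("", "", true) with
  | (ret, line, first_line) =>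
    if first_line then (ret ++ line) ++ "\n" else ((ret ++ pref) ++ line) ++ "\n"

-- ===== PORT B =====
-- pre.append(pre[-1] + len(w) + 1), folded over the words
def wrapB_preStep (acc : List Int) (w : String) : List Int :=
  acc ++ [PySem.List.pyGetD acc (-1) 0 + PySem.Str.len w + 1]

-- inner while loop: 'while j < n and pre[j+1] - pre[i] - 1 <= width: j += 1'
def wrapB_inner (pre : List Int) (width : Int) (n i j : Nat) : Nat :=
  if h : j < n ∧ PySem.List.pyGetD pre ((j : Int) + 1) 0 - PySem.List.pyGetD pre (i : Int) 0 - 1 ≤ width then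
    wrapB_inner pre width n i (j + 1)
  else j
termination_by n - j
decreasing_by have := h.1; omega

-- the inner loop only moves j forward (cited by wrapB_outer's termination proof)
theorem wrapB_inner_ge (pre : List Int) (width : Int) (n i j : Nat) :
    j ≤ wrapB_inner pre width n i j := by
  unfold wrapB_inner
  split
  · have := wrapB_inner_ge pre width n i (j + 1)
    omega
  · exact le_refl j
termination_by n - j
decreasing_by rename_i h; have := h.1; omega

-- outer while loop: 'while i < n: … pieces.append(" ".join(words[i:j])); i = j'
def wrapB_outer (words : List String) (pre : List Int) (width : Int) (i : Nat) : List String :=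
  if h : i < words.length then
    let j := wrapB_inner pre width words.length i (i + 1)
    PySem.Str.join " " (PySem.List.slice words (some (i : Int)) (some (j : Int))) ::
      wrapB_outer words pre width j
  else []
termination_by words.length - i
decreasing_by have := wrapB_inner_ge pre width words.length i (i + 1); omega

def wrap_text_line_alt (str : String) (pref : String) (width : Int) : String :=
  let words := PySem.Str.split₀ str
  if words = [] then "\n"
  else
    let pre := words.foldl wrapB_preStep [0]
    let pieces := wrapB_outer words pre width 0
    -- pieces is nonempty by construction, so pieces[0] via pyGetD is exact
    (PySem.List.pyGetD pieces 0 "" ++ "\n") ++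
      PySem.Str.join "" ((PySem.List.slice pieces (some 1) none).map (fun p => (pref ++ p) ++ "\n"))

-- ===== PRECONDITION & SPEC =====
def Spec_wrap_text_line (str : String) (pref : String) (width : Int) (out : String) : Prop := out = wrap_text_line_alt str pref width
instance (str : String) (pref : String) (width : Int) (out : String) : Decidable (Spec_wrap_text_line str pref width out) := by unfold Spec_wrap_text_line; infer_instance

-- ===== CLAIM (what is proved, stated in full; the proofs are below) =====
def Claim_equal_wrap_text_line : Prop := ∀ (str : String) (pref : String) (width : Int), Dom_wrap_text_line str pref width → Spec_wrap_text_line str pref width (wrap_text_line str pref width)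

-- ===== LEMMAS AND PROOFS =====

-- reference greedy grouping, recursive form: the list of completed lines
def grp (width : Int) : List String → String → List String
  | [], cur => [cur]
  | w :: ws, cur =>
    if PySem.Str.len cur + 1 + PySem.Str.len w > width then cur :: grp width ws w
    else grp width ws ((cur ++ " ") ++ w)

-- reference fold step (list of lines, current line)
def refStep (width : Int) (st : List String × String) (word : String) : List String × String :=
  match st with
  | (lines, cur) =>
    if cur = "" then (lines, word)
    else if PySem.Str.len cur + 1 + PySem.Str.len word > width then (lines ++ [cur], word)
    else (lines, (cur ++ " ") ++ word)

-- how a list of completed lines is formatted: first bare, the rest prefixed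
def fmtLines (pref : String) : List String → String
  | [] => ""
  | l0 :: rest => rest.foldl (fun out l => ((out ++ pref) ++ l) ++ "\n") (l0 ++ "\n")

-- ---- A's fold equals the reference fold, formatted (as in the invariant proof) ----
def wrapInv (pref : String) (stA : String × String × Bool) (stB : List String × String) : Prop :=
  stA.2.1 = stB.2 ∧
  ((stA.2.2 = true ∧ stB.1 = [] ∧ stA.1 = "") ∨
   (stA.2.2 = false ∧ stB.1 ≠ [] ∧ stA.1 = fmtLines pref stB.1))

theorem fmtLines_append_singleton (pref : String) (l0 : String) (rest : List String) (c : String) :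
    fmtLines pref ((l0 :: rest) ++ [c]) = ((fmtLines pref (l0 :: rest) ++ pref) ++ c) ++ "\n" := by
  simp [fmtLines, List.foldl_append]

theorem wrapInv_step (pref : String) (width : Int) (stA : String × String × Bool)
    (stB : List String × String) (w : String) (h : wrapInv pref stA stB) :
    wrapInv pref (wrapA_step pref width stA w) (refStep width stB w) := by
  obtain ⟨ret, line, first⟩ := stA
  obtain ⟨lines, cur⟩ := stB
  obtain ⟨h1, h2⟩ := h
  simp only at h1
  subst h1
  have hla : PySem.Str.len ((line ++ " ") ++ w) = PySem.Str.len line + 1 + PySem.Str.len w := by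
    rw [PySem.Str.len_append, PySem.Str.len_append]
    have hsp : PySem.Str.len " " = 1 := by decide
    omega
  simp only [wrapA_step, refStep, hla]
  by_cases hc : line = ""
  · rw [if_pos hc, if_pos hc]
    exact ⟨rfl, h2⟩
  · rw [if_neg hc, if_neg hc]
    by_cases hw : PySem.Str.len line + 1 + PySem.Str.len w > width
    · rw [if_pos hw, if_pos hw]
      rcases h2 with ⟨hf, hl, hr⟩ | ⟨hf, hl, hr⟩
      · subst hf hl hr
        refine ⟨rfl, Or.inr ⟨rfl, by simp, ?_⟩⟩
        simp [fmtLines]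
      · subst hf hr
        obtain ⟨l0, rest, rfl⟩ := List.exists_cons_of_ne_nil hl
        refine ⟨rfl, Or.inr ⟨rfl, by simp, ?_⟩⟩
        exact (fmtLines_append_singleton pref l0 rest line).symm
    · rw [if_neg hw, if_neg hw]
      rcases h2 with ⟨hf, hl, hr⟩ | ⟨hf, hl, hr⟩
      · subst hf hl hr
        exact ⟨rfl, Or.inl ⟨rfl, rfl, rfl⟩⟩
      · subst hf hr
        exact ⟨rfl, Or.inr ⟨rfl, hl, rfl⟩⟩

theorem wrapInv_foldl (pref : String) (width : Int) (ws : List String)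
    (stA : String × String × Bool) (stB : List String × String) (h : wrapInv pref stA stB) :
    wrapInv pref (ws.foldl (wrapA_step pref width) stA) (ws.foldl (refStep width) stB) := by
  induction ws generalizing stA stB with
  | nil => exact h
  | cons w ws ih => exact ih _ _ (wrapInv_step pref width stA stB w h)

-- A's result is fmtLines of the reference fold's lines
theorem wrapA_eq_fmt (str pref : String) (width : Int) :
    wrap_text_line str pref width =
      fmtLines pref
        (((PySem.Str.split₀ str).foldl (refStep width) ([], "")).1 ++
          [((PySem.Str.split₀ str).foldl (refStep width) ([], "")).2]) := by
  unfold wrap_text_line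
  have h := wrapInv_foldl pref width (PySem.Str.split₀ str) ("", "", true) ([], "")
    ⟨rfl, Or.inl ⟨rfl, rfl, rfl⟩⟩
  rcases hA : (PySem.Str.split₀ str).foldl (wrapA_step pref width) ("", "", true) with ⟨ret, line, first⟩
  rcases hB : (PySem.Str.split₀ str).foldl (refStep width) ([], "") with ⟨lines, cur⟩
  rw [hA, hB] at h
  obtain ⟨h1, h2⟩ := h
  simp only at h1
  subst h1
  rcases h2 with ⟨hf, hl, hr⟩ | ⟨hf, hl, hr⟩
  · subst hf hl hr
    simp [fmtLines]
  · subst hf hr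
    obtain ⟨l0, rest, rfl⟩ := List.exists_cons_of_ne_nil hl
    simp [fmtLines, List.foldl_append]

-- ---- the reference fold equals the recursive grouping (needs nonempty words) ----
theorem refStep_eq_grp (width : Int) (ws : List String) (lines : List String) (cur : String)
    (hcur : cur ≠ "") (hws : ∀ w ∈ ws, w ≠ "") :
    (ws.foldl (refStep width) (lines, cur)).1 ++ [(ws.foldl (refStep width) (lines, cur)).2] =
      lines ++ grp width ws cur := by
  induction ws generalizing lines cur with
  | nil => simp [grp]
  | cons w ws ih =>
    have hw : w ≠ "" := hws w (by simp)
    have hws' : ∀ w' ∈ ws, w' ≠ "" := fun w' h' => hws w' (by simp [h'])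
    simp only [List.foldl_cons, refStep, if_neg hcur, grp]
    by_cases hb : PySem.Str.len cur + 1 + PySem.Str.len w > width
    · rw [if_pos hb, if_pos hb, ih (lines ++ [cur]) w hw hws']
      simp
    · rw [if_neg hb, if_neg hb]
      have hcur' : (cur ++ " ") ++ w ≠ "" := by
        intro he
        have : ((cur ++ " ") ++ w).toList = ("" : String).toList := by rw [he]
        simp at this
      exact ih lines ((cur ++ " ") ++ w) hcur' hws'

-- ---- all words of str.split() are nonempty ----
theorem split₀go_ne_nil (l cur : List Char) (acc : List (List Char))
    (hacc : ∀ cs ∈ acc, cs ≠ []) :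
    ∀ cs ∈ PySem.Chars.split₀.go l cur acc, cs ≠ [] := by
  induction l generalizing cur acc with
  | nil =>
    intro cs hcs
    simp only [PySem.Chars.split₀.go] at hcs
    split at hcs
    · exact hacc cs (List.mem_reverse.mp hcs)
    · rcases List.mem_cons.mp (List.mem_reverse.mp hcs) with h | h
      · rename_i hne
        subst h
        intro he
        exact hne (by simp [List.reverse_eq_nil_iff.mp he])
      · exact hacc cs h
  | cons c rest ih =>
    intro cs hcs
    simp only [PySem.Chars.split₀.go] at hcs
    split at hcs
    · split at hcs
      · exact ih [] acc hacc cs hcs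
      · refine ih [] (cur.reverse :: acc) ?_ cs hcs
        intro ds hds
        rcases List.mem_cons.mp hds with h | h
        · rename_i hne
          subst h
          intro he
          exact hne (by simp [List.reverse_eq_nil_iff.mp he])
        · exact hacc ds h
    · exact ih (c :: cur) acc hacc cs hcs

theorem split₀_words_ne_empty (s : String) : ∀ w ∈ PySem.Str.split₀ s, w ≠ "" := by
  intro w hw
  unfold PySem.Str.split₀ at hw
  rcases List.mem_map.mp hw with ⟨cs, hcs, rfl⟩
  have hne : cs ≠ [] := split₀go_ne_nil s.toList [] [] (by simp) cs hcs
  intro he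
  apply hne
  have : (String.ofList cs).toList = ("" : String).toList := by rw [he]
  simpa using this

-- ---- prefix sums: characterising B's `pre` list ----
def preScan : List String → Int → List Int
  | [], t => [t]
  | w :: ws, t => t :: preScan ws (t + PySem.Str.len w + 1)

def Spre (words : List String) (k : Nat) : Int :=
  ((words.take k).map (fun w => PySem.Str.len w + 1)).sum

theorem foldl_preStep (ws : List String) (acc : List Int) (t : Int) :
    ws.foldl wrapB_preStep (acc ++ [t]) = acc ++ preScan ws t := by
  induction ws generalizing acc t with
  | nil => simp [preScan]
  | cons w ws ih =>
    have hstep : wrapB_preStep (acc ++ [t]) w = (acc ++ [t]) ++ [t + PySem.Str.len w + 1] := by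
      simp [wrapB_preStep, PySem.List.pyGetD, PySem.List.pyGet?_neg_one]
    simp only [List.foldl_cons, hstep, ih, preScan]
    simp

theorem preScan_get (ws : List String) (t : Int) (k : Nat) (hk : k ≤ ws.length) :
    (preScan ws t)[k]? = some (t + Spre ws k) := by
  induction ws generalizing t k with
  | nil =>
    have hk0 : k = 0 := by simpa using hk
    subst hk0
    simp [preScan, Spre]
  | cons w ws ih =>
    cases k with
    | zero => simp [preScan, Spre]
    | succ k =>
      simp only [preScan, List.getElem?_cons_succ]
      rw [ih _ k (by simpa using hk)]
      simp only [Spre, List.take_succ_cons, List.map_cons, List.sum_cons]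
      ring_nf

-- ---- segment sums and join lengths ----
theorem Spre_sub (words : List String) (i k : Nat) (hik : i ≤ k) :
    (((words.drop i).take (k - i)).map (fun w => PySem.Str.len w + 1)).sum =
      Spre words k - Spre words i := by
  have h : words.take k = words.take i ++ (words.drop i).take (k - i) := by
    rw [← List.take_add]
    congr 1
    omega
  simp only [Spre, h, List.map_append, List.sum_append]
  ring

theorem chars_join_len (c : List Char) (css : List (List Char)) :
    (PySem.Chars.join [' '] (c :: css)).length = c.length + (css.map (fun cs => cs.length + 1)).sum := by
  induction css generalizing c with
  | nil => simp [PySem.Chars.join_singleton]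
  | cons d css ih =>
    rw [PySem.Chars.join_cons_cons]
    simp only [List.length_append, ih d, List.map_cons, List.sum_cons, List.length_cons,
      List.length_nil]
    omega

theorem sum_len_cast (ys : List String) :
    ((ys.map (fun w => PySem.Str.len w + 1)).sum : Int) =
      ((ys.map (fun w => w.toList.length + 1)).sum : Nat) := by
  rw [Nat.cast_list_sum, List.map_map]
  congr 1

theorem join_len (x : String) (xs : List String) :
    PySem.Str.len (PySem.Str.join " " (x :: xs)) =
      ((x :: xs).map (fun w => PySem.Str.len w + 1)).sum - 1 := by
  have h1 : (PySem.Str.join " " (x :: xs)).toList =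
      PySem.Chars.join [' '] (x.toList :: xs.map String.toList) := by
    rw [PySem.Str.toList_join]; rfl
  have h2 := chars_join_len x.toList (xs.map String.toList)
  have h3 : ((xs.map String.toList).map (fun cs : List Char => cs.length + 1)) =
      xs.map (fun w => w.toList.length + 1) := by rw [List.map_map]; rfl
  rw [h3] at h2
  rw [sum_len_cast]
  unfold PySem.Str.len
  rw [h1, h2]
  simp only [List.map_cons, List.sum_cons]
  push_cast
  ring

-- String ++ facts used below
theorem sapp_assoc (a b c : String) : (a ++ b) ++ c = a ++ (b ++ c) := by
  apply String.toList_inj.mp; simp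

theorem join_empty_nil : PySem.Str.join "" ([] : List String) = "" := by decide

theorem join_empty_cons (x : String) (xs : List String) :
    PySem.Str.join "" (x :: xs) = x ++ PySem.Str.join "" xs := by
  apply String.toList_inj.mp
  rw [PySem.Str.toList_join, String.toList_append, PySem.Str.toList_join]
  rw [show ("" : String).toList = [] from rfl]
  cases xs with
  | nil => simp [PySem.Chars.join_singleton, PySem.Chars.join_nil]
  | cons y ys =>
    simp only [List.map_cons]
    rw [PySem.Chars.join_cons_cons]
    simp

theorem join_space_singleton (x : String) : PySem.Str.join " " [x] = x := by
  apply String.toList_inj.mp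
  rw [PySem.Str.toList_join]
  simp [PySem.Chars.join_singleton]

theorem join_space_cons (x y : String) (ys : List String) :
    PySem.Str.join " " (x :: y :: ys) = (x ++ " ") ++ PySem.Str.join " " (y :: ys) := by
  apply String.toList_inj.mp
  rw [PySem.Str.toList_join, String.toList_append, String.toList_append, PySem.Str.toList_join]
  simp only [List.map_cons]
  rw [PySem.Chars.join_cons_cons]

theorem join_space_append (x : String) (xs : List String) (w : String) :
    PySem.Str.join " " ((x :: xs) ++ [w]) = (PySem.Str.join " " (x :: xs) ++ " ") ++ w := by
  induction xs generalizing x with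
  | nil =>
    rw [List.cons_append, List.nil_append, join_space_cons, join_space_singleton,
      join_space_singleton]
  | cons y ys ih =>
    simp only [List.cons_append] at ih ⊢
    rw [join_space_cons x y (ys ++ [w]), ih y, join_space_cons x y ys]
    simp [sapp_assoc]

-- the word segment words[i:k+1] splits off its last word
theorem seg_take_succ (words : List String) (i k : Nat) (hik : i ≤ k) (hk : k < words.length) :
    (words.drop i).take (k + 1 - i) = (words.drop i).take (k - i) ++ [words.getD k ""] := by
  have h1 : k + 1 - i = (k - i) + 1 := by omega
  rw [h1, List.take_add_one]
  congr 1
  have h2 : (words.drop i)[k - i]? = some (words.getD k "") := by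
    rw [List.getElem?_drop]
    have h3 : i + (k - i) = k := by omega
    rw [h3, List.getElem?_eq_getElem hk, List.getD_eq_getElem _ _ hk]
  simp [h2]

-- nonemptiness of the segment words[i:k] for i < k ≤ n
theorem seg_ne_nil (words : List String) (i k : Nat) (hik : i < k) (hk : k ≤ words.length) :
    (words.drop i).take (k - i) ≠ [] := by
  have h : ((words.drop i).take (k - i)).length = min (k - i) (words.length - i) := by simp
  intro he
  rw [he] at h
  simp at h
  omega

-- ---- indexing the prefix-sum list ----
theorem pre_get (words : List String) (k : Nat) (hk : k ≤ words.length) :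
    PySem.List.pyGetD (preScan words 0) (k : Int) 0 = Spre words k := by
  rw [PySem.List.pyGetD_natCast]
  rw [List.getD_eq_getElem?_getD, preScan_get words 0 k hk]
  simp

theorem len_joinik (words : List String) (i k : Nat) (hik : i < k) (hk : k ≤ words.length) :
    PySem.Str.len (PySem.Str.join " " ((words.drop i).take (k - i))) =
      Spre words k - Spre words i - 1 := by
  obtain ⟨x, xs, hx⟩ := List.exists_cons_of_ne_nil (seg_ne_nil words i k hik hk)
  rw [hx, join_len, ← hx, Spre_sub words i k (by omega)]

-- ---- the main B-side lemma: inner/outer loops versus the recursive grouping ----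
theorem outer_eq_grp (words : List String) (width : Int) (i k : Nat)
    (hik : i < k) (hk : k ≤ words.length) :
    grp width (words.drop k)
        (PySem.Str.join " " ((words.drop i).take (k - i))) =
      PySem.Str.join " "
          ((words.drop i).take (wrapB_inner (preScan words 0) width words.length i k - i)) ::
        wrapB_outer words (preScan words 0) width
          (wrapB_inner (preScan words 0) width words.length i k) := by
  rw [wrapB_inner]
  split_ifs with hc
  · -- inner loop advances: the next word still fits
    obtain ⟨hkn, hcond⟩ := hc
    have hcast : ((k : Int) + 1) = ((k + 1 : Nat) : Int) := by push_cast; ring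
    rw [hcast, pre_get words (k + 1) (by omega), pre_get words i (by omega)] at hcond
    have hdrop : words.drop k = words.getD k "" :: words.drop (k + 1) := by
      rw [List.drop_eq_getElem_cons hkn, List.getD_eq_getElem?_getD,
        List.getElem?_eq_getElem hkn]
      simp
    rw [hdrop, grp]
    have hwlen : PySem.Str.len (words.getD k "") = Spre words (k + 1) - Spre words k - 1 := by
      have h1 : (words.drop k).take 1 = [words.getD k ""] := by
        rw [hdrop]; simp
      have := len_joinik words k (k + 1) (by omega) (by omega)
      rw [show k + 1 - k = 1 from by omega, h1, join_space_singleton] at this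
      exact this
    have hcur := len_joinik words i k hik (by omega)
    rw [if_neg (by rw [hwlen, hcur]; omega)]
    have hext : (PySem.Str.join " " ((words.drop i).take (k - i)) ++ " ") ++ words.getD k "" =
        PySem.Str.join " " ((words.drop i).take (k + 1 - i)) := by
      rw [seg_take_succ words i k (by omega) hkn]
      obtain ⟨x, xs, hx⟩ := List.exists_cons_of_ne_nil (seg_ne_nil words i k hik (by omega))
      rw [hx, join_space_append]
    rw [hext]
    exact outer_eq_grp words width i (k + 1) (by omega) (by omega)
  · -- inner loop stops at k
    by_cases hkn : k < words.length
    · -- the next word does not fit: a line break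
      have hgt : ¬ (Spre words (k + 1) - Spre words i - 1 ≤ width) := by
        intro hle
        apply hc
        refine ⟨hkn, ?_⟩
        have hcast : ((k : Int) + 1) = ((k + 1 : Nat) : Int) := by push_cast; ring
        rw [hcast, pre_get words (k + 1) (by omega), pre_get words i (by omega)]
        exact hle
      have hdrop : words.drop k = words.getD k "" :: words.drop (k + 1) := by
        rw [List.drop_eq_getElem_cons hkn, List.getD_eq_getElem?_getD,
          List.getElem?_eq_getElem hkn]
        simp
      have hwlen : PySem.Str.len (words.getD k "") = Spre words (k + 1) - Spre words k - 1 := by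
        have h1 : (words.drop k).take 1 = [words.getD k ""] := by
          rw [hdrop]; simp
        have := len_joinik words k (k + 1) (by omega) (by omega)
        rw [show k + 1 - k = 1 from by omega, h1, join_space_singleton] at this
        exact this
      have hcur := len_joinik words i k hik (by omega)
      rw [hdrop, grp, if_pos (by rw [hwlen, hcur]; omega)]
      congr 1
      -- the rest: grp on the remaining words = the outer loop resumed at k
      have hrec := outer_eq_grp words width k (k + 1) (by omega) (by omega)
      have h1 : (words.drop k).take (k + 1 - k) = [words.getD k ""] := by
        rw [show k + 1 - k = 1 from by omega, hdrop]; simp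
      rw [h1, join_space_singleton] at hrec
      rw [hrec]
      conv_rhs => rw [wrapB_outer]
      simp only [dif_pos hkn, PySem.List.slice_natCast]
    · -- k = n: no words left, the current line is the last piece
      have hkeq : k = words.length := by omega
      have hdrop : words.drop k = [] := by
        rw [List.drop_eq_nil_iff]
        omega
      rw [hdrop, grp, wrapB_outer, dif_neg (by omega)]
termination_by words.length - k

-- grp never returns the empty list
theorem grp_ne_nil (width : Int) (ws : List String) (cur : String) : grp width ws cur ≠ [] := by
  induction ws generalizing cur with
  | nil => simp [grp]
  | cons w ws ih =>
    simp only [grp]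
    split
    · simp
    · exact ih _

-- B's result is fmtLines of the recursive grouping
theorem fmt_tail (pref : String) (rest : List String) (acc : String) :
    rest.foldl (fun out l => ((out ++ pref) ++ l) ++ "\n") acc =
      acc ++ PySem.Str.join "" (rest.map (fun p => (pref ++ p) ++ "\n")) := by
  induction rest generalizing acc with
  | nil => simp [join_empty_nil]
  | cons p rest ih =>
    simp only [List.foldl_cons, List.map_cons, join_empty_cons, ih]
    simp [sapp_assoc]

-- ===== VERDICT (by name: the statement is the Claim_ definition above) =====
theorem wrap_text_line_spec : Claim_equal_wrap_text_line := by
  intro str pref width _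
  unfold Spec_wrap_text_line
  rw [wrapA_eq_fmt]
  simp only [wrap_text_line_alt]
  by_cases hw : PySem.Str.split₀ str = []
  · rw [hw]
    simp [fmtLines]
  · obtain ⟨w, ws, hcons⟩ := List.exists_cons_of_ne_nil hw
    have hne := split₀_words_ne_empty str
    have hw0 : w ≠ "" := hne w (by rw [hcons]; simp)
    have hws : ∀ x ∈ ws, x ≠ "" := fun x hx => hne x (by rw [hcons]; simp [hx])
    have hA : ((PySem.Str.split₀ str).foldl (refStep width) ([], "")).1 ++
        [((PySem.Str.split₀ str).foldl (refStep width) ([], "")).2] = grp width ws w := by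
      rw [hcons, List.foldl_cons]
      have hstep : refStep width ([], "") w = ([], w) := by simp [refStep]
      rw [hstep, refStep_eq_grp width ws [] w hw0 hws]
      simp
    rw [hA, if_neg hw]
    have hpre : (PySem.Str.split₀ str).foldl wrapB_preStep [0] = preScan (PySem.Str.split₀ str) 0 := by
      simpa using foldl_preStep (PySem.Str.split₀ str) [] 0
    rw [hpre, hcons]
    have hL := outer_eq_grp (w :: ws) width 0 1 (by omega) (by simp)
    simp only [List.drop_one, List.tail_cons, List.drop_zero, Nat.sub_zero,
      List.take_succ_cons, List.take_zero, join_space_singleton] at hL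
    have houter : wrapB_outer (w :: ws) (preScan (w :: ws) 0) width 0 = grp width ws w := by
      rw [wrapB_outer, dif_pos (by simp : 0 < (w :: ws).length)]
      simp only [PySem.List.slice_natCast, Nat.sub_zero, List.drop_zero]
      exact hL.symm
    rw [houter]
    obtain ⟨l0, rest, hgr⟩ := List.exists_cons_of_ne_nil (grp_ne_nil width ws w)
    rw [hgr]
    simp only [PySem.List.slice_from_one, List.tail_cons]
    have hget : PySem.List.pyGetD (l0 :: rest) 0 "" = l0 := by
      rw [show (0 : Int) = ((0 : Nat) : Int) from rfl, PySem.List.pyGetD_natCast]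
      rfl
    rw [hget]
    simp only [fmtLines]
    rw [fmt_tail]
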